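-- pv_equiv track=rewrite | github.com/fnauman/ts-agents | ts_agents/cli/skills.py | _extract_command_sequences
-- ===== SOURCE A (Python) =====
-- from typing import Any, Dict, List, Optional, Tuple
--
-- def _normalize_ts_agents_command(command: str) -> str:
--     normalized = " ".join(command.strip().split())
--     if normalized.startswith("uv run ts-agents "):
--         return "ts-agents " + normalized[len("uv run ts-agents ") :]
--     return normalized
--
-- def _extract_command_sequences(lines: List[str]) -> List[str]:
--     commands: List[str] = []
--     current: List[str] = []
--
--     def _maybe_finalize() -> None:
--         if not current:
--             return
--         commands.append(_normalize_ts_agents_command(" ".join(current)))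
--         current.clear()
--
--     for raw_line in lines:
--         stripped = raw_line.strip()
--         if not stripped:
--             _maybe_finalize()
--             continue
--
--         is_start = stripped.startswith("uv run ts-agents ") or stripped.startswith("ts-agents ")
--         if not current and not is_start:
--             continue
--
--         continuation = stripped.endswith("\\")
--         chunk = stripped[:-1].rstrip() if continuation else stripped
--         current.append(chunk)
--
--         if not continuation:
--             _maybe_finalize()
--
--     _maybe_finalize()
--     return commands
-- ===== SOURCE B (Python) =====
-- from typing import List
--
-- def _normalize_ts_agents_command(command: str) -> str:
--     normalized = " ".join(command.strip().split())
--     if normalized.startswith("uv run ts-agents "):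
--         return "ts-agents " + normalized[len("uv run ts-agents ") :]
--     return normalized
--
-- def _extract_command_sequences(lines: List[str]) -> List[str]:
--     commands: List[str] = []
--     i = 0
--     n = len(lines)
--     while i < n:
--         stripped = lines[i].strip()
--         if not stripped or not (
--             stripped.startswith("uv run ts-agents ") or stripped.startswith("ts-agents ")
--         ):
--             i += 1
--             continue
--         parts: List[str] = []
--         while i < n:
--             stripped = lines[i].strip()
--             if not stripped:
--                 break  # blank ends the group; outer loop re-examines this line
--             continuation = stripped.endswith("\\")
--             parts.append(stripped[:-1].rstrip() if continuation else stripped)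
--             i += 1
--             if not continuation:
--                 break
--         commands.append(_normalize_ts_agents_command(" ".join(parts)))
--     return commands
-- ===== Notes on version B (the rewrite author's own statement) =====
-- stated objective: alternative
-- what changed: Replaces A's single fold threading a (commands, current-buffer) state machine with an index-based scanner: an outer loop that skips blank/non-start lines and, per group, an inner loop that collects continuation chunks and advances the index, so no cross-iteration buffer state exists.
import Mathlib
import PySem

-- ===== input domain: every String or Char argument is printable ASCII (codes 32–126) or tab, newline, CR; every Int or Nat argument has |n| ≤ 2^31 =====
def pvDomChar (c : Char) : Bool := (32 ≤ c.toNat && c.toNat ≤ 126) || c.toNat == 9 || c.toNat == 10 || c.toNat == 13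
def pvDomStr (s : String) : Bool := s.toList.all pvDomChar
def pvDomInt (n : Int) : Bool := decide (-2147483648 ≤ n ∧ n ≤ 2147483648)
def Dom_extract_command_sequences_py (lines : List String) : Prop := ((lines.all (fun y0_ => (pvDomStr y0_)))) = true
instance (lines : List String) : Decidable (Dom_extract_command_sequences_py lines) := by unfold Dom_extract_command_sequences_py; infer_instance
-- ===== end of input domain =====

-- B replaces A's accumulator state machine (current-group buffer threaded through one fold)
-- by an index-based scanner: an outer skip loop and an inner group-collecting loop (objective: alternative decomposition).

-- ===== PORT A =====
-- shared helper: _normalize_ts_agents_command (identical in Source A and Source B)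
def pvNormalize (command : String) : String :=
  let normalized := PySem.Str.join " " (PySem.Str.split₀ (PySem.Str.strip command))
  if PySem.Str.startswith normalized "uv run ts-agents " then
    "ts-agents " ++ PySem.Str.slice normalized (some 17) none
  else normalized

-- _maybe_finalize: append normalized joined current (if nonempty) and clear it
def pvFinalize (commands current : List String) : List String :=
  if current = [] then commands
  else commands ++ [pvNormalize (PySem.Str.join " " current)]

-- one iteration of A's for-loop; state = (commands, current)
def pvStepA (st : List String × List String) (raw_line : String) : List String × List String :=
  let stripped := PySem.Str.strip raw_line
  if stripped = "" then (pvFinalize st.1 st.2, [])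
  else
    let is_start := PySem.Str.startswith stripped "uv run ts-agents " ||
                    PySem.Str.startswith stripped "ts-agents "
    if st.2 = [] ∧ is_start = false then st
    else
      let continuation := PySem.Str.endswith stripped "\\"
      let chunk := if continuation then PySem.Str.rstrip (PySem.Str.slice stripped none (some (-1)))
                   else stripped
      let current := st.2 ++ [chunk]
      if continuation = false then (pvFinalize st.1 current, []) else (st.1, current)

def extract_command_sequences_py (lines : List String) : List String :=
  let st := lines.foldl pvStepA ([], [])
  pvFinalize st.1 st.2

-- ===== PORT B =====
def pvIsStart (stripped : String) : Bool :=
  PySem.Str.startswith stripped "uv run ts-agents " || PySem.Str.startswith stripped "ts-agents "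

-- inner while loop of Source B: collect one group's chunks; returns (parts, remaining lines)
-- (the remaining suffix of `lines` plays the role of the index i)
def pvScanGroup : List String → List String → List String × List String
  | [], parts => (parts, [])
  | l :: ls, parts =>
    let stripped := PySem.Str.strip l
    if stripped = "" then (parts, l :: ls)   -- break without advancing i
    else
      let continuation := PySem.Str.endswith stripped "\\"
      let chunk := if continuation then PySem.Str.rstrip (PySem.Str.slice stripped none (some (-1)))
                   else stripped
      if continuation then pvScanGroup ls (parts ++ [chunk])
      else (parts ++ [chunk], ls)

theorem pvScanGroup_len_le : ∀ (rest parts : List String), (pvScanGroup rest parts).2.length ≤ rest.length := by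
  intro rest
  induction rest with
  | nil => intro parts; simp [pvScanGroup]
  | cons l ls ih =>
    intro parts
    simp only [pvScanGroup]
    split
    · simp
    · split
      · exact le_trans (ih _) (by simp)
      · simp

theorem pvScanGroup_cons_lt (l : String) (ls parts : List String) (h : ¬ PySem.Str.strip l = "") :
    (pvScanGroup (l :: ls) parts).2.length < ls.length + 1 := by
  simp only [pvScanGroup, if_neg h]
  split
  · exact Nat.lt_succ_of_le (pvScanGroup_len_le _ _)
  · simp

-- outer while loop of Source B
def pvOuter : List String → List String
  | [] => []
  | l :: ls =>
    let stripped := PySem.Str.strip l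
    if _h : stripped = "" ∨ pvIsStart stripped = false then pvOuter ls
    else
      let r := pvScanGroup (l :: ls) []
      pvNormalize (PySem.Str.join " " r.1) :: pvOuter r.2
termination_by rest => rest.length
decreasing_by
  · simp
  · have hne : ¬ PySem.Str.strip l = "" := by tauto
    simpa using pvScanGroup_cons_lt l ls [] hne

def extract_command_sequences_py_alt (lines : List String) : List String :=
  pvOuter lines

-- ===== PRECONDITION & SPEC =====
def Spec_extract_command_sequences_py (lines : List String) (out : List String) : Prop := out = extract_command_sequences_py_alt lines
instance (lines : List String) (out : List String) : Decidable (Spec_extract_command_sequences_py lines out) := by unfold Spec_extract_command_sequences_py; infer_instance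

-- ===== CLAIM (what is proved, stated in full; the proofs are below) =====
def Claim_equal_extract_command_sequences_py : Prop := ∀ (lines : List String), Dom_extract_command_sequences_py lines → Spec_extract_command_sequences_py lines (extract_command_sequences_py lines)

-- ===== LEMMAS AND PROOFS =====

-- the chunk a non-blank stripped line contributes (shared shape of both ports' branches)
def pvChunk (s : String) : String :=
  if PySem.Str.endswith s "\\" = true then PySem.Str.rstrip (PySem.Str.slice s none (some (-1))) else s

theorem stepA_blank (cmds cur : List String) (l : String) (hs : PySem.Str.strip l = "") :
    pvStepA (cmds, cur) l = (pvFinalize cmds cur, []) := by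
  simp [pvStepA, hs]

theorem stepA_skip (cmds : List String) (l : String) (hs : ¬ PySem.Str.strip l = "")
    (hstart : pvIsStart (PySem.Str.strip l) = false) :
    pvStepA (cmds, []) l = (cmds, []) := by
  simp only [pvIsStart, Bool.or_eq_false_iff] at hstart
  obtain ⟨h1, h2⟩ := hstart
  simp at h1 h2
  simp [pvStepA, hs, h1, h2]

theorem stepA_active (cmds cur : List String) (l : String) (hs : ¬ PySem.Str.strip l = "")
    (hact : ¬ (cur = [] ∧ pvIsStart (PySem.Str.strip l) = false)) :
    pvStepA (cmds, cur) l =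
      (if PySem.Str.endswith (PySem.Str.strip l) "\\" = true then (cmds, cur ++ [pvChunk (PySem.Str.strip l)])
       else (pvFinalize cmds (cur ++ [pvChunk (PySem.Str.strip l)]), [])) := by
  simp only [pvIsStart] at hact
  simp only [pvStepA, pvChunk, if_neg hs, if_neg hact]
  split <;> simp_all

theorem scan_blank (parts : List String) (l : String) (ls : List String)
    (hs : PySem.Str.strip l = "") : pvScanGroup (l :: ls) parts = (parts, l :: ls) := by
  simp [pvScanGroup, hs]

theorem scan_step (parts : List String) (l : String) (ls : List String)
    (hs : ¬ PySem.Str.strip l = "") :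
    pvScanGroup (l :: ls) parts =
      (if PySem.Str.endswith (PySem.Str.strip l) "\\" = true then pvScanGroup ls (parts ++ [pvChunk (PySem.Str.strip l)])
       else (parts ++ [pvChunk (PySem.Str.strip l)], ls)) := by
  simp only [pvScanGroup, pvChunk, if_neg hs]

theorem outer_skip (l : String) (ls : List String)
    (h : PySem.Str.strip l = "" ∨ pvIsStart (PySem.Str.strip l) = false) :
    pvOuter (l :: ls) = pvOuter ls := by
  rw [pvOuter]
  exact dif_pos h

theorem outer_group (l : String) (ls : List String)
    (h : ¬ (PySem.Str.strip l = "" ∨ pvIsStart (PySem.Str.strip l) = false)) :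
    pvOuter (l :: ls) =
      pvNormalize (PySem.Str.join " " (pvScanGroup (l :: ls) []).1) :: pvOuter (pvScanGroup (l :: ls) []).2 := by
  rw [pvOuter]
  exact dif_neg h

-- combined invariant: M (outside a group) and G (inside a group, current = cur ≠ [])
theorem pvMainAux : ∀ (n : Nat) (rest : List String), rest.length ≤ n →
    (∀ cmds cur, cur ≠ [] →
      (fun st => pvFinalize st.1 st.2) (List.foldl pvStepA (cmds, cur) rest) =
        (cmds ++ [pvNormalize (PySem.Str.join " " (pvScanGroup rest cur).1)]) ++ pvOuter (pvScanGroup rest cur).2) ∧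
    (∀ cmds,
      (fun st => pvFinalize st.1 st.2) (List.foldl pvStepA (cmds, []) rest) = cmds ++ pvOuter rest) := by
  intro n
  induction n with
  | zero =>
    intro rest hr
    have hrest : rest = [] := List.length_eq_zero_iff.mp (Nat.le_zero.mp hr)
    subst hrest
    refine ⟨fun cmds cur hcur => ?_, fun cmds => ?_⟩
    · simp [pvScanGroup, pvOuter, pvFinalize, hcur]
    · simp [pvOuter, pvFinalize]
  | succ n ih =>
    intro rest hr
    match rest with
    | [] =>
      refine ⟨fun cmds cur hcur => ?_, fun cmds => ?_⟩
      · simp [pvScanGroup, pvOuter, pvFinalize, hcur]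
      · simp [pvOuter, pvFinalize]
    | l :: ls =>
      have hls : ls.length ≤ n := by simpa using Nat.succ_le_succ_iff.mp hr
      obtain ⟨ihG, ihM⟩ := ih ls hls
      by_cases hs : PySem.Str.strip l = ""
      · -- blank line: A finalizes, B's outer loop skips
        refine ⟨fun cmds cur hcur => ?_, fun cmds => ?_⟩
        · rw [List.foldl_cons, stepA_blank cmds cur l hs, ihM, scan_blank cur l ls hs,
              outer_skip l ls (Or.inl hs)]
          simp [pvFinalize, hcur]
        · rw [List.foldl_cons, stepA_blank cmds [] l hs, ihM, outer_skip l ls (Or.inl hs)]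
          simp [pvFinalize]
      · by_cases hc : PySem.Str.endswith (PySem.Str.strip l) "\\" = true
        · -- non-blank continuation line
          refine ⟨fun cmds cur hcur => ?_, fun cmds => ?_⟩
          · rw [List.foldl_cons, stepA_active cmds cur l hs (by simp [hcur]), if_pos hc,
                scan_step cur l ls hs, if_pos hc]
            exact ihG cmds (cur ++ [pvChunk (PySem.Str.strip l)]) (by simp)
          · by_cases hst : pvIsStart (PySem.Str.strip l) = true
            · rw [List.foldl_cons, stepA_active cmds [] l hs (by simp [hst]), if_pos hc,
                  outer_group l ls (by simp [hs, hst]), scan_step [] l ls hs, if_pos hc]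
              rw [List.nil_append,
                  ihG cmds [pvChunk (PySem.Str.strip l)] (by simp)]
              simp
            · rw [List.foldl_cons,
                  stepA_skip cmds l hs (Bool.not_eq_true _ ▸ hst), ihM,
                  outer_skip l ls (Or.inr (Bool.not_eq_true _ ▸ hst))]
        · -- non-blank terminating line
          refine ⟨fun cmds cur hcur => ?_, fun cmds => ?_⟩
          · rw [List.foldl_cons, stepA_active cmds cur l hs (by simp [hcur]), if_neg hc,
                scan_step cur l ls hs, if_neg hc, ihM]
            simp [pvFinalize]
          · by_cases hst : pvIsStart (PySem.Str.strip l) = true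
            · rw [List.foldl_cons, stepA_active cmds [] l hs (by simp [hst]), if_neg hc,
                  outer_group l ls (by simp [hs, hst]), scan_step [] l ls hs, if_neg hc, ihM]
              simp [pvFinalize]
            · rw [List.foldl_cons,
                  stepA_skip cmds l hs (Bool.not_eq_true _ ▸ hst), ihM,
                  outer_skip l ls (Or.inr (Bool.not_eq_true _ ▸ hst))]

-- ===== VERDICT (by name: the statement is the Claim_ definition above) =====
theorem extract_command_sequences_py_spec : Claim_equal_extract_command_sequences_py := by
  intro lines _
  unfold Spec_extract_command_sequences_py extract_command_sequences_py extract_command_sequences_py_alt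
  exact (pvMainAux lines.length lines le_rfl).2 []
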